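-- pv_equiv track=rewrite | github.com/neeraj-r-rugi/PESU-FILES | 1st-Sem-Chem-Cycle/Subject_Files/Python/Student_material/PCPS_Theory_Level1_Problems_with_solution/Batch_3_Wednesday/wednesday_level1_agriculture_production_analysis.py | yearly_production_summary
-- ===== SOURCE A (Python) =====
-- def yearly_production_summary(data, crop_name):
--     production_by_year = {}
--     for row in data:
--         if row[1] == crop_name:
--             year = row[0].split('-')[2]  # Extract year from date
--             if year not in production_by_year:
--                 production_by_year[year] = 0
--             production_by_year[year] += row[3]
--     return production_by_year
-- ===== SOURCE B (Python) =====
-- def yearly_production_summary(data, crop_name):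
--     pairs = [(row[0].split('-')[2], row[3]) for row in data if row[1] == crop_name]
--     years = list(dict.fromkeys(y for y, _ in pairs))
--     return {y: sum(p for yy, p in pairs if yy == y) for y in years}
-- ===== Notes on version B (the rewrite author's own statement) =====
-- stated objective: alternative
-- what changed: Replaces the single pass that mutates a dict (membership test, zero-init, in-place +=) by a filter-map to (year, production) pairs, an ordered key dedup via dict.fromkeys, and a per-key sum comprehension.
import Mathlib
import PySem

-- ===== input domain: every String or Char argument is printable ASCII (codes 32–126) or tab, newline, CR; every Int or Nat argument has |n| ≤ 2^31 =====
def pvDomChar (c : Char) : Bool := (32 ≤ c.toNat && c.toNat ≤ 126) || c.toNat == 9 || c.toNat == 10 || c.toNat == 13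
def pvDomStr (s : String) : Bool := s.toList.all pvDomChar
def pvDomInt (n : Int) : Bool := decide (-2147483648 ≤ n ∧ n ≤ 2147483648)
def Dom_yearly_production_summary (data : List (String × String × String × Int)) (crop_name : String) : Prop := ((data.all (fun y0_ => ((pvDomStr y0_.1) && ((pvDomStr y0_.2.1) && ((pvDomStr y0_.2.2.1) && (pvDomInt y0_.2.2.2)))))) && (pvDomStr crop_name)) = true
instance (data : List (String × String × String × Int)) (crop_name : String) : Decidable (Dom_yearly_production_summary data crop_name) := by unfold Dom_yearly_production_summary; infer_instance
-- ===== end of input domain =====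

-- B replaces A's dict-mutating single pass by a filter-map to pairs, an ordered key dedup,
-- and a per-key sum (alternative decomposition, same results).

-- ===== PORT A =====
-- row[0].split('-')[2]; the index is in range under Pre_ (Python raises IndexError otherwise)
def pvYearA (s : String) : String := PySem.List.pyGetD ((PySem.Str.split? s "-").getD []) 2 ""

def yearly_production_summary (data : List (String × String × String × Int)) (crop_name : String) : List (String × Int) :=
  (data.foldl (fun (d : PySem.Dict String Int) row =>
      if row.2.1 == crop_name then
        let year := pvYearA row.1
        let d := if !d.contains year then d.insert year 0 else d
        d.insert year (d.getD year 0 + row.2.2.2)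
      else d) PySem.Dict.empty).items

-- ===== PORT B =====
def yearly_production_summary_alt (data : List (String × String × String × Int)) (crop_name : String) : List (String × Int) :=
  let pairs := (data.filter (fun row => row.2.1 == crop_name)).map
      (fun row => (PySem.List.pyGetD ((PySem.Str.split? row.1 "-").getD []) 2 "", row.2.2.2))
  let years := PySem.List.dedup (pairs.map (·.1))
  years.map (fun y => (y, ((pairs.filter (fun p => p.1 == y)).map (·.2)).sum))

-- ===== PRECONDITION & SPEC =====
-- Pre_ excludes exactly the inputs where Python A raises IndexError: a matching row whose
-- date field has fewer than three '-'-separated parts.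
def Pre_yearly_production_summary (data : List (String × String × String × Int)) (crop_name : String) : Prop :=
  ∀ row ∈ data, row.2.1 = crop_name → PySem.Raise.InRange ((PySem.Str.split? row.1 "-").getD []).length 2
instance (data : List (String × String × String × Int)) (crop_name : String) : Decidable (Pre_yearly_production_summary data crop_name) := by unfold Pre_yearly_production_summary; infer_instance

def pvWitness_yearly_production_summary : (List (String × String × String × Int)) × String :=
  ([("01-05-2020", "wheat", "r", 7), ("01-06-2020", "rice", "r", 3), ("02-07-2020", "wheat", "r", 5)], "wheat")

def Spec_yearly_production_summary (data : List (String × String × String × Int)) (crop_name : String) (out : List (String × Int)) : Prop := out = yearly_production_summary_alt data crop_name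
instance (data : List (String × String × String × Int)) (crop_name : String) (out : List (String × Int)) : Decidable (Spec_yearly_production_summary data crop_name out) := by unfold Spec_yearly_production_summary; infer_instance

-- ===== CLAIM (what is proved, stated in full; the proofs are below) =====
def Claim_equal_yearly_production_summary : Prop := ∀ (data : List (String × String × String × Int)) (crop_name : String), Dom_yearly_production_summary data crop_name → Pre_yearly_production_summary data crop_name → Spec_yearly_production_summary data crop_name (yearly_production_summary data crop_name)

-- ===== LEMMAS AND PROOFS =====

-- A's step on a matching row equals a single insert with the accumulated sum.
theorem pvStepA (d : PySem.Dict String Int) (y : String) (p : Int) :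
    (let d' := if !d.contains y then d.insert y 0 else d
     d'.insert y (d'.getD y 0 + p)) = d.insert y (d.getD y 0 + p) := by
  by_cases h : d.contains y = true
  · simp [h]
  · simp only [Bool.not_eq_true] at h
    simp [h, PySem.Dict.insert_insert_self, PySem.Dict.getD_insert_self,
      PySem.Dict.getD_of_not_contains _ _ h]

-- A filtered/mapped fold: the guard-and-project loop is the fold over the pair list.
theorem pvFoldFilterMap {α β σ : Type} (c : α → Bool) (f : α → β) (g : σ → β → σ)
    (l : List α) (init : σ) :
    l.foldl (fun s a => if c a then g s (f a) else s) init
      = ((l.filter c).map f).foldl g init := by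
  induction l generalizing init with
  | nil => rfl
  | cons a l ih =>
    by_cases h : c a = true <;> simp [List.filter, h, ih]

theorem pvGetDFold (l : List (String × Int)) (d : PySem.Dict String Int) (y : String) :
    (l.foldl (fun d p => d.insert p.1 (d.getD p.1 0 + p.2)) d).getD y 0
      = d.getD y 0 + ((l.filter (fun p => p.1 == y)).map (·.2)).sum := by
  induction l generalizing d with
  | nil => simp
  | cons p l ih =>
    simp only [List.foldl_cons, ih, List.filter]
    by_cases h : p.1 = y
    · simp [h, PySem.Dict.getD_insert_self]
      ring
    · have hb : (p.1 == y) = false := by simp [h]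
      simp [hb, PySem.Dict.getD_insert_of_ne _ _ _ (Ne.symm h)]

theorem yps_main (data : List (String × String × String × Int)) (crop_name : String) :
    yearly_production_summary data crop_name = yearly_production_summary_alt data crop_name := by
  unfold yearly_production_summary yearly_production_summary_alt
  have hstep : (fun (d : PySem.Dict String Int) row =>
      if row.2.1 == crop_name then
        let year := pvYearA row.1
        let d := if !d.contains year then d.insert year 0 else d
        d.insert year (d.getD year 0 + row.2.2.2)
      else d)
      = (fun (d : PySem.Dict String Int) (row : String × String × String × Int) =>
          if row.2.1 == crop_name then
            d.insert (pvYearA row.1) (d.getD (pvYearA row.1) 0 + row.2.2.2)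
          else d) := by
    funext d row
    by_cases h : (row.2.1 == crop_name) = true
    · simp only [h, if_true]
      exact pvStepA d (pvYearA row.1) row.2.2.2
    · simp [h]
  rw [hstep]
  rw [pvFoldFilterMap (fun row => row.2.1 == crop_name)
      (fun row => (pvYearA row.1, row.2.2.2))
      (fun d p => d.insert p.1 (d.getD p.1 0 + p.2)) data PySem.Dict.empty]
  set pairs := ((data.filter (fun row => row.2.1 == crop_name)).map
      (fun row => (pvYearA row.1, row.2.2.2))) with hpairs
  have hnodup : (pairs.foldl (fun d p => d.insert p.1 (d.getD p.1 0 + p.2)) PySem.Dict.empty).keys.Nodup := by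
    apply PySem.Dict.nodup_keys_foldl_insert_key pairs Prod.fst
      (fun d p => d.getD p.1 0 + p.2)
    simp
  have hkeys : (pairs.foldl (fun d p => d.insert p.1 (d.getD p.1 0 + p.2)) PySem.Dict.empty).keys
      = PySem.List.dedup (pairs.map (·.1)) := by
    rw [PySem.Dict.keys_foldl_insert_key]
    simp [PySem.Set.update, PySem.Set.ofList, PySem.Dict.keys_empty, PySem.List.dedup_eq_ofList]
  rw [PySem.Dict.items_eq_map_keys _ hnodup 0, hkeys]
  refine List.map_congr_left ?_
  intro y hy
  rw [pvGetDFold]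
  simp [hpairs, pvYearA]

-- ===== VERDICT (by name: the statement is the Claim_ definition above) =====
theorem yearly_production_summary_spec : Claim_equal_yearly_production_summary := by
  intro data crop_name _ _
  unfold Spec_yearly_production_summary
  exact yps_main data crop_name
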